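-- pv_equiv track=rewrite | github.com/lhrevolte-102/open-unlearning | scripts/analyze_infocurl_search.py | parse_run_name
-- ===== SOURCE A (Python) =====
-- def parse_run_name(name: str):
--     parts = name.split("_")
--     mode = None
--     gamma = None
--     k = None
--     for part in parts:
--         if part in {"easy", "hard", "active"}:
--             mode = part
--         elif part.startswith("g"):
--             gamma = part
--         elif part.startswith("k"):
--             k = part
--     return {"mode": mode, "gamma": gamma, "K": k}
-- ===== SOURCE B (Python) =====
-- def parse_run_name(name: str):
--     parts = name.split("_")
--     mode = next((p for p in reversed(parts) if p in {"easy", "hard", "active"}), None)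
--     gamma = next((p for p in reversed(parts) if p.startswith("g")), None)
--     k = next((p for p in reversed(parts) if p.startswith("k")), None)
--     return {"mode": mode, "gamma": gamma, "K": k}
-- ===== Notes on version B (the rewrite author's own statement) =====
-- stated objective: idiomatic
-- what changed: Replaced the single stateful classifying loop (last-match-wins via mutable variables) by three independent first-match scans over reversed(parts), one per field, using next() with a default.
import Mathlib
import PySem

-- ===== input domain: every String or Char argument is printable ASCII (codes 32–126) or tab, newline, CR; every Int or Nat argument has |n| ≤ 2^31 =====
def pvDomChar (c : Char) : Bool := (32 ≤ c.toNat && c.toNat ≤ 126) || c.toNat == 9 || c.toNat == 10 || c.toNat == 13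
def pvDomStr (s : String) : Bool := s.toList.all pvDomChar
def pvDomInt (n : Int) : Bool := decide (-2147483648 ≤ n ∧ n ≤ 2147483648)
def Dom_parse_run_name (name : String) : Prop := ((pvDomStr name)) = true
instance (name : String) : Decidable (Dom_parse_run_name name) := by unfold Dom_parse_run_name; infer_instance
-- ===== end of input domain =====

-- B replaces A's single stateful classifying loop by three independent reversed first-match
-- scans (idiomatic decomposition); behaviour is identical, no speed claim.

-- shared token predicates (the literal tests both Pythons perform)
def pvModeP (p : String) : Bool := p == "easy" || p == "hard" || p == "active"
def pvGP (p : String) : Bool := PySem.Str.startswith p "g"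
def pvKP (p : String) : Bool := PySem.Str.startswith p "k"

-- ===== PORT A =====
def parse_run_name (name : String) : List (String × Option String) :=
  let parts := (PySem.Str.split? name "_").getD []
  let st := parts.foldl
    (fun (s : Option String × Option String × Option String) part =>
      if pvModeP part then (some part, s.2.1, s.2.2)
      else if pvGP part then (s.1, some part, s.2.2)
      else if pvKP part then (s.1, s.2.1, some part)
      else s)
    (none, none, none)
  [("mode", st.1), ("gamma", st.2.1), ("K", st.2.2)]

-- ===== PORT B =====
def parse_run_name_alt (name : String) : List (String × Option String) :=
  let parts := (PySem.Str.split? name "_").getD []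
  [("mode", parts.reverse.find? pvModeP),
   ("gamma", parts.reverse.find? pvGP),
   ("K", parts.reverse.find? pvKP)]

-- ===== PRECONDITION & SPEC =====
def Spec_parse_run_name (name : String) (out : List (String × Option String)) : Prop := out = parse_run_name_alt name
instance (name : String) (out : List (String × Option String)) : Decidable (Spec_parse_run_name name out) := by unfold Spec_parse_run_name; infer_instance

-- ===== CLAIM (what is proved, stated in full; the proofs are below) =====
def Claim_equal_parse_run_name : Prop := ∀ (name : String), Dom_parse_run_name name → Spec_parse_run_name name (parse_run_name name)

-- ===== LEMMAS AND PROOFS =====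

lemma pv_mode_not_gk {p : String} (h : pvModeP p = true) : pvGP p = false ∧ pvKP p = false := by
  have : p = "easy" ∨ p = "hard" ∨ p = "active" := by
    simp [pvModeP] at h; tauto
  rcases this with h | h | h <;> subst h <;> exact ⟨by decide, by decide⟩

lemma pv_g_not_k {p : String} (h : pvGP p = true) : pvKP p = false := by
  by_contra hk
  have hk : pvKP p = true := by revert hk; cases pvKP p <;> simp
  rw [pvGP, PySem.Str.startswith_eq, PySem.Chars.startswith_iff] at h
  rw [pvKP, PySem.Str.startswith_eq, PySem.Chars.startswith_iff] at hk
  have hg1 : "g".toList = ['g'] := by simp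
  have hk1 : "k".toList = ['k'] := by simp
  rw [hg1] at h; rw [hk1] at hk
  obtain ⟨t1, ht1⟩ := h
  obtain ⟨t2, ht2⟩ := hk
  rw [← ht1] at ht2
  simp at ht2

lemma pv_foldl_triple (parts : List String) (m g k : Option String) :
    parts.foldl
      (fun (s : Option String × Option String × Option String) part =>
        if pvModeP part then (some part, s.2.1, s.2.2)
        else if pvGP part then (s.1, some part, s.2.2)
        else if pvKP part then (s.1, s.2.1, some part)
        else s)
      (m, g, k)
    = ((parts.reverse.find? pvModeP).or m,
       (parts.reverse.find? pvGP).or g,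
       (parts.reverse.find? pvKP).or k) := by
  induction parts generalizing m g k with
  | nil => simp
  | cons a parts ih =>
    simp only [List.foldl_cons, List.reverse_cons, List.find?_append]
    by_cases hm : pvModeP a = true
    · obtain ⟨hg, hk⟩ := pv_mode_not_gk hm
      simp [hm, hg, hk, ih]
    · by_cases hg : pvGP a = true
      · have hk := pv_g_not_k hg
        simp [hm, hg, hk, ih]
      · by_cases hk : pvKP a = true
        · simp [hm, hg, hk, ih]
        · simp [hm, hg, hk, ih]

-- ===== VERDICT (by name: the statement is the Claim_ definition above) =====
theorem parse_run_name_spec : Claim_equal_parse_run_name := by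
  intro name _
  unfold Spec_parse_run_name parse_run_name parse_run_name_alt
  simp [pv_foldl_triple]
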